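-- pv_equiv track=rewrite | github.com/BAD-fa/W3_homework | 1604A.py | era
-- ===== SOURCE A (Python) =====
-- def era(sequence: list, i=1, res=0):
--     if not len(sequence):
--         return res
--
--     else:
--         ai = sequence[0]
--         if ai <= (i + res):
--             i += 1
--
--         else:
--             res += ai - (i + res)
--             i += 1
--
--         return era(sequence[1:], i, res)
-- ===== SOURCE B (Python) =====
-- def era(sequence: list, i=1, res=0):
--     # One O(n) pass: each recursive step of A amounts to res = max(res, a - position)
--     k = i
--     for a in sequence:
--         res = max(res, a - k)
--         k += 1
--     return res
-- ===== Notes on version B (the rewrite author's own statement) =====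
-- stated objective: faster
-- what changed: Replaced recursion with list slicing and a conditional update by a single iterative pass keeping a running position and taking res = max(res, a - position), exploiting that A's else-branch update res += a-(i+res) equals max(res, a-i).
import Mathlib
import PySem

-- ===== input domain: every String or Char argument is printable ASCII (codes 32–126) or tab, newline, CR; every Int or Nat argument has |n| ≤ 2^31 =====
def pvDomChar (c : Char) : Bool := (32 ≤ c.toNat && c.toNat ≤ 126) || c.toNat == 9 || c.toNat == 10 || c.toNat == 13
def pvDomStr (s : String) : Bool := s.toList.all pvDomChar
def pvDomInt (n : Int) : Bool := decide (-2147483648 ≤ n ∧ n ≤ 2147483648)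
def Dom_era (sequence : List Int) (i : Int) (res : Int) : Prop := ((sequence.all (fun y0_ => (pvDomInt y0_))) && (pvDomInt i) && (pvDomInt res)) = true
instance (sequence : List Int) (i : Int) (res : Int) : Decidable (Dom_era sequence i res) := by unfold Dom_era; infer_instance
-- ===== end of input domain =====

-- B replaces A's recursion-with-slicing by a single O(n) pass using res = max(res, a - position); objective: faster.


-- ===== PORT A =====
def era (sequence : List Int) (i : Int) (res : Int) : Int :=
  match sequence with
  | [] => res
  | ai :: rest =>
      if ai ≤ i + res then era rest (i + 1) res
      else era rest (i + 1) (res + (ai - (i + res)))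

-- ===== PORT B =====
-- B: one pass with a running position k, res = max(res, a - k)
def era_alt (sequence : List Int) (i : Int) (res : Int) : Int :=
  (sequence.foldl (fun (st : Int × Int) a => (st.1 + 1, max st.2 (a - st.1))) (i, res)).2

-- ===== PRECONDITION & SPEC =====
def Spec_era (sequence : List Int) (i : Int) (res : Int) (out : Int) : Prop := out = era_alt sequence i res
instance (sequence : List Int) (i : Int) (res : Int) (out : Int) : Decidable (Spec_era sequence i res out) := by unfold Spec_era; infer_instance

-- ===== CLAIM (what is proved, stated in full; the proofs are below) =====
def Claim_equal_era : Prop := ∀ (sequence : List Int) (i : Int) (res : Int), Dom_era sequence i res → Spec_era sequence i res (era sequence i res)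

-- ===== LEMMAS AND PROOFS =====

-- ===== VERDICT (by name: the statement is the Claim_ definition above) =====
lemma era_eq_alt : ∀ (sequence : List Int) (i res : Int),
    era sequence i res = era_alt sequence i res := by
  intro sequence
  induction sequence with
  | nil => intro i res; rfl
  | cons a rest ih =>
      intro i res
      have hstep : era_alt (a :: rest) i res = era_alt rest (i + 1) (max res (a - i)) := rfl
      rw [hstep]
      show (if a ≤ i + res then era rest (i + 1) res
            else era rest (i + 1) (res + (a - (i + res)))) = _
      split_ifs with h
      · rw [ih]; congr 1; omega
      · rw [ih]; congr 1; omega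

theorem era_spec : Claim_equal_era := by
  intro sequence i res _
  unfold Spec_era
  exact era_eq_alt sequence i res
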